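-- pv_equiv track=rewrite | github.com/veteranop/VetRender | gui/dialogs.py | get_angles_for_points
-- ===== SOURCE A (Python) =====
-- def get_angles_for_points(points):
--     """Get angle list for given point count"""
--     if points == 4:
--         return [0, 90, 180, 270]
--     elif points == 12:
--         return [i * 30 for i in range(12)]
--     elif points == 24:
--         return [i * 15 for i in range(24)]
--     elif points == 36:
--         return [i * 10 for i in range(36)]
--     return []
-- ===== SOURCE B (Python) =====
-- def _angles_from(angle, step):
--     """Recursively collect angles from `angle` up to (but not including) 360."""
--     if angle >= 360:
--         return []
--     return [angle] + _angles_from(angle + step, step)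
--
--
-- def get_angles_for_points(points):
--     """Get angle list for given point count"""
--     if points not in (4, 12, 24, 36):
--         return []
--     return _angles_from(0, 360 // int(points))
-- ===== Notes on version B (the rewrite author's own statement) =====
-- stated objective: alternative
-- what changed: Replaced the four explicit branch bodies (a literal list plus three per-count comprehensions) by one recursive generator that, after a single validity check, builds the angle list by stepping 360//points from 0 up to 360.
import Mathlib
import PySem

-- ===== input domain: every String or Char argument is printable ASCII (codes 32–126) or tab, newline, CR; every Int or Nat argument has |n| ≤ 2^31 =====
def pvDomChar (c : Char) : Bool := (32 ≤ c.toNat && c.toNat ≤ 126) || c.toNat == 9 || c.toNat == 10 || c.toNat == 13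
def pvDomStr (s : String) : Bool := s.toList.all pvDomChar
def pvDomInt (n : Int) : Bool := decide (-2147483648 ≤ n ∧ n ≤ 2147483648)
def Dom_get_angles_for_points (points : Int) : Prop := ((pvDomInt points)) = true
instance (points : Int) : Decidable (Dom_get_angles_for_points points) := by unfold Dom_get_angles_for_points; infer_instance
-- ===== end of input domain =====

-- B replaces A's four explicit branch bodies by one recursive step-wise generator after a single validity check; objective: alternative.

-- ===== PORT A =====
def get_angles_for_points (points : Int) : List Int :=
  if points = 4 then [0, 90, 180, 270]
  else if points = 12 then (PySem.List.pyRange 0 12 1).map (fun i => i * 30)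
  else if points = 24 then (PySem.List.pyRange 0 24 1).map (fun i => i * 15)
  else if points = 36 then (PySem.List.pyRange 0 36 1).map (fun i => i * 10)
  else []

-- ===== PORT B =====
-- B's recursive helper. The second disjunct of the stopping test is a totality
-- guard only: on every step value the caller actually passes, Python's recursion terminates.
def anglesFrom (angle : Int) (step : Int) : List Int :=
  if 360 ≤ angle ∨ step ≤ 0 then []
  else angle :: anglesFrom (angle + step) step
termination_by (360 - angle).toNat
decreasing_by omega

def get_angles_for_points_alt (points : Int) : List Int :=
  if points = 4 ∨ points = 12 ∨ points = 24 ∨ points = 36 then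
    anglesFrom 0 (PySem.Int.floordiv 360 points)
  else []

-- ===== PRECONDITION & SPEC =====
def Spec_get_angles_for_points (points : Int) (out : List Int) : Prop := out = get_angles_for_points_alt points
instance (points : Int) (out : List Int) : Decidable (Spec_get_angles_for_points points out) := by unfold Spec_get_angles_for_points; infer_instance

-- ===== CLAIM (what is proved, stated in full; the proofs are below) =====
def Claim_equal_get_angles_for_points : Prop := ∀ (points : Int), Dom_get_angles_for_points points → Spec_get_angles_for_points points (get_angles_for_points points)

-- ===== LEMMAS AND PROOFS =====
theorem anglesFrom_cons (a s : Int) (hlt : a < 360) (hs : 0 < s) :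
    anglesFrom a s = a :: anglesFrom (a + s) s := by
  rw [anglesFrom, if_neg (by omega)]

theorem anglesFrom_nil (a s : Int) (hge : 360 ≤ a) :
    anglesFrom a s = [] := by
  rw [anglesFrom, if_pos (Or.inl hge)]

-- ===== VERDICT (by name: the statement is the Claim_ definition above) =====
theorem get_angles_for_points_spec : Claim_equal_get_angles_for_points := by
  intro points _
  unfold Spec_get_angles_for_points get_angles_for_points get_angles_for_points_alt
  by_cases h4 : points = 4
  · subst h4
    have hs : PySem.Int.floordiv 360 4 = 90 := by decide
    norm_num [hs, anglesFrom_cons, anglesFrom_nil]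
  · by_cases h12 : points = 12
    · subst h12
      have hs : PySem.Int.floordiv 360 12 = 30 := by decide
      norm_num [hs, anglesFrom_cons, anglesFrom_nil]
      decide
    · by_cases h24 : points = 24
      · subst h24
        have hs : PySem.Int.floordiv 360 24 = 15 := by decide
        norm_num [hs, anglesFrom_cons, anglesFrom_nil]
        decide
      · by_cases h36 : points = 36
        · subst h36
          have hs : PySem.Int.floordiv 360 36 = 10 := by decide
          norm_num [hs, anglesFrom_cons, anglesFrom_nil]
          decide
        · simp [h4, h12, h24, h36]
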